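-- pv_equiv track=rewrite | github.com/feiphoon/ner-pipeline | src/F_synthesise_annotated_abstracts/prepare_annotated_abstracts_for_entity_replacement.py | create_tuple_of_name_counts
-- ===== SOURCE A (Python) =====
-- from typing import List, Any, Tuple
--
-- def create_tuple_of_name_counts(lst: List[Any]) -> Tuple[int]:
--     """Scientific count is hardcoded to 1 - because scientific names will just be repeated."""
--     alpha_lst = [el for el in lst if str(el).isalpha()]
--     return tuple(
--         [
--             alpha_lst.count("common"),
--             alpha_lst.count("pharmaceutical"),
--         ]
--     )
-- ===== SOURCE B (Python) =====
-- def create_tuple_of_name_counts(lst):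
--     """Scientific count is hardcoded to 1 - because scientific names will just be repeated."""
--     c_common = 0
--     c_pharma = 0
--     for el in lst:
--         if str(el).isalpha():
--             if el == "common":
--                 c_common += 1
--             elif el == "pharmaceutical":
--                 c_pharma += 1
--     return (c_common, c_pharma)
-- ===== Notes on version B (the rewrite author's own statement) =====
-- stated objective: alternative
-- what changed: Replaces building an alpha-filtered intermediate list plus two .count scans with a single pass over lst maintaining two counters.
import Mathlib
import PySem

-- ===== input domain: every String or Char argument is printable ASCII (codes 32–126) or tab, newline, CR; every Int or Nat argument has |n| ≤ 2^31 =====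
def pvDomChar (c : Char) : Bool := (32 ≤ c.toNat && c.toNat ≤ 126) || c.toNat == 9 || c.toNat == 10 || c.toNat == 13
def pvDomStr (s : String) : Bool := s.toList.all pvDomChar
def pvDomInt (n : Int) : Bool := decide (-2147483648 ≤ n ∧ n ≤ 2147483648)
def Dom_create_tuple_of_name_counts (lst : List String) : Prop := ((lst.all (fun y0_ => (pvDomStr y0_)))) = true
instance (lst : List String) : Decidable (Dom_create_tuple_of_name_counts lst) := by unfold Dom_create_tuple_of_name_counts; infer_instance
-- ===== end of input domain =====

-- B replaces A's alpha-filtered intermediate list plus two .count scans by a single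
-- fold over the input carrying two counters (objective: alternative single-pass structure).

-- ===== PORT A =====
-- Port of A: build the alpha-filtered list, then count "common" and "pharmaceutical" in it.
def create_tuple_of_name_counts (lst : List String) : List Int :=
  let alpha_lst := lst.filter (fun el => PySem.Str.strIsalpha el)
  [(alpha_lst.count "common" : Int), (alpha_lst.count "pharmaceutical" : Int)]

-- ===== PORT B =====
-- Port of B: one pass over lst with two integer counters (loop body = ctonc_step).
def ctonc_step (acc : Int × Int) (el : String) : Int × Int :=
  if PySem.Str.strIsalpha el then
    if el == "common" then (acc.1 + 1, acc.2)
    else if el == "pharmaceutical" then (acc.1, acc.2 + 1)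
    else acc
  else acc

def create_tuple_of_name_counts_alt (lst : List String) : List Int :=
  let cp := lst.foldl ctonc_step (0, 0)
  [cp.1, cp.2]

-- ===== PRECONDITION & SPEC =====
def Spec_create_tuple_of_name_counts (lst : List String) (out : List Int) : Prop := out = create_tuple_of_name_counts_alt lst
instance (lst : List String) (out : List Int) : Decidable (Spec_create_tuple_of_name_counts lst out) := by unfold Spec_create_tuple_of_name_counts; infer_instance

-- ===== CLAIM (what is proved, stated in full; the proofs are below) =====
def Claim_equal_create_tuple_of_name_counts : Prop := ∀ (lst : List String), Dom_create_tuple_of_name_counts lst → Spec_create_tuple_of_name_counts lst (create_tuple_of_name_counts lst)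

-- ===== LEMMAS AND PROOFS =====
theorem ctonc_foldl (lst : List String) : ∀ (a b : Int),
    lst.foldl ctonc_step (a, b)
    = (a + ((lst.filter (fun el => PySem.Str.strIsalpha el)).count "common" : Int),
       b + ((lst.filter (fun el => PySem.Str.strIsalpha el)).count "pharmaceutical" : Int)) := by
  induction lst with
  | nil => intro a b; simp
  | cons x xs ih =>
    intro a b
    rw [List.foldl_cons]
    by_cases hα : PySem.Chars.strIsalpha x.toList = true
    · by_cases hc : x = "common"
      · obtain rfl := hc
        rw [show ctonc_step (a, b) "common" = (a + 1, b) by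
              simp only [ctonc_step]; rw [if_pos (by decide), if_pos (by decide)], ih,
            List.filter_cons, if_pos (by decide)]
        refine Prod.ext ?_ ?_ <;> simp <;> omega
      · by_cases hp : x = "pharmaceutical"
        · obtain rfl := hp
          rw [show ctonc_step (a, b) "pharmaceutical" = (a, b + 1) by
                simp only [ctonc_step]
                rw [if_pos (by decide), if_neg (by decide), if_pos (by decide)], ih,
              List.filter_cons, if_pos (by decide)]
          refine Prod.ext ?_ ?_ <;> simp <;> omega
        · rw [show ctonc_step (a, b) x = (a, b) by simp [ctonc_step, hα, hc, hp], ih]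
          refine Prod.ext ?_ ?_ <;> simp [hα, hc, hp]
    · rw [show ctonc_step (a, b) x = (a, b) by simp [ctonc_step, hα], ih]
      refine Prod.ext ?_ ?_ <;> simp [hα]

-- ===== VERDICT (by name: the statement is the Claim_ definition above) =====
theorem create_tuple_of_name_counts_spec : Claim_equal_create_tuple_of_name_counts := by
  intro lst _
  unfold Spec_create_tuple_of_name_counts create_tuple_of_name_counts create_tuple_of_name_counts_alt
  rw [ctonc_foldl]
  simp
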